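-- pv_equiv track=rewrite | github.com/yangskin/SPsync | sp_receive.py | match_material_to_textureset
-- ===== SOURCE A (Python) =====
-- def match_material_to_textureset(
--     material_name: str,
--     textureset_names: list[str],
--     slot_name: str | None = None,
-- ) -> str | None:
--     """将 UE 材质槽/材质名匹配到 SP TextureSet 名称。
--
--     SP TextureSet 名称来源于 FBX 导入时的材质名，通常与 UE 的材质槽名(slot_name)一致。
--
--     匹配策略（按优先级）：
--     1. slot_name 精确匹配 TextureSet 名
--     2. slot_name 大小写不敏感匹配
--     3. material_name 精确匹配
--     4. material_name 去 MI_ 前缀后匹配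
--     5. 大小写不敏感匹配（material_name / 去 MI_ 前缀）
--
--     Args:
--         material_name: UE 材质资产名（如 "MI_Body"）。
--         textureset_names: SP TextureSet 名称列表。
--         slot_name: UE 材质槽名称（如 "Body"），优先用于匹配。
--
--     Returns:
--         匹配的 TextureSet 名，或 None。
--
--     >>> match_material_to_textureset("MI_Body", ["Body", "Weapon"], slot_name="Body")
--     'Body'
--     >>> match_material_to_textureset("MI_Body", ["body"], slot_name="Body")
--     'body'
--     >>> match_material_to_textureset("MI_Body", ["MI_Body", "MI_Weapon"])
--     'MI_Body'
--     >>> match_material_to_textureset("MI_Body", ["Body", "Weapon"])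
--     'Body'
--     >>> match_material_to_textureset("MI_Unknown", ["Body", "Weapon"]) is None
--     True
--     """
--     # ── slot_name 匹配（最高优先级）──
--     if slot_name:
--         # 1. slot_name 精确匹配
--         if slot_name in textureset_names:
--             return slot_name
--         # 2. slot_name 大小写不敏感
--         slot_lower = slot_name.lower()
--         for ts_name in textureset_names:
--             if ts_name.lower() == slot_lower:
--                 return ts_name
--
--     # ── material_name fallback ──
--     # 3. 精确匹配
--     if material_name in textureset_names:
--         return material_name
--
--     # 4. 去掉 MI_ 前缀后匹配
--     stripped = material_name
--     if stripped.startswith("MI_") or stripped.startswith("mi_"):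
--         stripped = stripped[3:]
--     if stripped != material_name and stripped in textureset_names:
--         return stripped
--
--     # 5. 大小写不敏感
--     mat_lower = material_name.lower()
--     stripped_lower = stripped.lower()
--     for ts_name in textureset_names:
--         ts_lower = ts_name.lower()
--         if ts_lower == mat_lower or ts_lower == stripped_lower:
--             return ts_name
--
--     return None
-- ===== SOURCE B (Python) =====
-- def match_material_to_textureset(
--     material_name: str,
--     textureset_names: list[str],
--     slot_name: str | None = None,
-- ) -> str | None:
--     """Single pass: record the first match for each priority rank, then return
--     the best-ranked one (1 slot exact, 2 slot case-insensitive, 3 material exact,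
--     4 stripped-MI_ exact, 5 case-insensitive material/stripped)."""
--     stripped = material_name[3:] if (material_name.startswith("MI_") or material_name.startswith("mi_")) else material_name
--     slot_ok = bool(slot_name)
--     sl = slot_name.lower() if slot_ok else ""
--     ml = material_name.lower()
--     spl = stripped.lower()
--     r1 = r2 = r3 = r4 = r5 = None
--     for n in textureset_names:
--         nl = n.lower()
--         if slot_ok and r1 is None and n == slot_name:
--             r1 = n
--         if slot_ok and r2 is None and nl == sl:
--             r2 = n
--         if r3 is None and n == material_name:
--             r3 = n
--         if r4 is None and stripped != material_name and n == stripped: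
--             r4 = n
--         if r5 is None and (nl == ml or nl == spl):
--             r5 = n
--     for r in (r1, r2, r3, r4, r5):
--         if r is not None:
--             return r
--     return None
-- ===== Notes on version B (the rewrite author's own statement) =====
-- stated objective: alternative
-- what changed: A makes up to five separate passes over textureset_names (two membership tests and three search loops with early returns); B makes exactly one pass, recording the first element matching each of the five priority ranks in five registers, and returns the best-ranked register afterwards.
import Mathlib
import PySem

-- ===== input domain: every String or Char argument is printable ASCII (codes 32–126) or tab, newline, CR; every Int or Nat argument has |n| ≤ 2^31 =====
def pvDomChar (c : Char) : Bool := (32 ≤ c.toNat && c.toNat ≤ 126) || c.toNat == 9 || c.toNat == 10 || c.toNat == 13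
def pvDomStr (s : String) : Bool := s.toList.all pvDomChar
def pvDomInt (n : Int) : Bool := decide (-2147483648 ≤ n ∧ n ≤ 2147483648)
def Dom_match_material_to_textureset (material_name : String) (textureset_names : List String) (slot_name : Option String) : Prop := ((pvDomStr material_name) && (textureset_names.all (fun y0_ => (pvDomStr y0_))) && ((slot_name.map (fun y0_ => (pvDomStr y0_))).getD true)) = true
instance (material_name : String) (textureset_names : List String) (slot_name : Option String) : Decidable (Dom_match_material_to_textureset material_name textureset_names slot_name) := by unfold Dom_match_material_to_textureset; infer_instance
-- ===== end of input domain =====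

-- B replaces A's three membership scans plus two fallback loops by ONE pass over the
-- list recording the first match of each of the five priority ranks (objective: alternative).

-- ===== PORT A =====
-- A's "for ts_name in textureset_names: if ts_name.lower() == slot_lower: return ts_name"
def pvLoopSlot (slotLower : String) : List String → Option String
  | [] => none
  | n :: rest => if PySem.Str.lower n == slotLower then some n else pvLoopSlot slotLower rest

-- A's final case-insensitive loop
def pvLoop5 (matLower strippedLower : String) : List String → Option String
  | [] => none
  | n :: rest =>
      let nl := PySem.Str.lower n
      if nl == matLower || nl == strippedLower then some n else pvLoop5 matLower strippedLower rest

-- A's material_name fallback (steps 3–5), reached when the slot branch falls through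
def pvFallbackA (material_name : String) (textureset_names : List String) : Option String :=
  if textureset_names.contains material_name then some material_name
  else
    let stripped := if PySem.Str.startswith material_name "MI_" || PySem.Str.startswith material_name "mi_"
                    then PySem.Str.slice material_name (some 3) none else material_name
    if stripped != material_name && textureset_names.contains stripped then some stripped
    else pvLoop5 (PySem.Str.lower material_name) (PySem.Str.lower stripped) textureset_names

def match_material_to_textureset (material_name : String) (textureset_names : List String) (slot_name : Option String) : Option String :=
  match slot_name with
  | some s =>
      if s ≠ "" then  -- Python truthiness of slot_name
        if textureset_names.contains s then some s
        else
          match pvLoopSlot (PySem.Str.lower s) textureset_names with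
          | some n => some n
          | none => pvFallbackA material_name textureset_names
      else pvFallbackA material_name textureset_names
  | none => pvFallbackA material_name textureset_names

-- ===== PORT B =====
-- Source B's loop body: update the five "first match of rank k" registers
def pvStep (slotOk : Bool) (sv m stripped sl ml spl : String)
    (st : Option String × Option String × Option String × Option String × Option String) (n : String) :
    Option String × Option String × Option String × Option String × Option String :=
  let nl := PySem.Str.lower n
  ( if slotOk && st.1.isNone && (n == sv) then some n else st.1,
    if slotOk && st.2.1.isNone && (nl == sl) then some n else st.2.1,
    if st.2.2.1.isNone && (n == m) then some n else st.2.2.1,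
    if st.2.2.2.1.isNone && (stripped != m) && (n == stripped) then some n else st.2.2.2.1,
    if st.2.2.2.2.isNone && (nl == ml || nl == spl) then some n else st.2.2.2.2 )

def match_material_to_textureset_alt (material_name : String) (textureset_names : List String) (slot_name : Option String) : Option String :=
  let stripped := if PySem.Str.startswith material_name "MI_" || PySem.Str.startswith material_name "mi_"
                  then PySem.Str.slice material_name (some 3) none else material_name
  let slotOk := match slot_name with | some s => !(s == "") | none => false
  let sv := slot_name.getD ""
  let sl := if slotOk then PySem.Str.lower sv else ""
  let ml := PySem.Str.lower material_name
  let spl := PySem.Str.lower stripped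
  let st := textureset_names.foldl (pvStep slotOk sv material_name stripped sl ml spl) (none, none, none, none, none)
  st.1.or (st.2.1.or (st.2.2.1.or (st.2.2.2.1.or st.2.2.2.2)))

-- ===== PRECONDITION & SPEC =====
def Spec_match_material_to_textureset (material_name : String) (textureset_names : List String) (slot_name : Option String) (out : Option String) : Prop := out = match_material_to_textureset_alt material_name textureset_names slot_name
instance (material_name : String) (textureset_names : List String) (slot_name : Option String) (out : Option String) : Decidable (Spec_match_material_to_textureset material_name textureset_names slot_name out) := by unfold Spec_match_material_to_textureset; infer_instance

-- ===== CLAIM (what is proved, stated in full; the proofs are below) =====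
def Claim_equal_match_material_to_textureset : Prop := ∀ (material_name : String) (textureset_names : List String) (slot_name : Option String), Dom_match_material_to_textureset material_name textureset_names slot_name → Spec_match_material_to_textureset material_name textureset_names slot_name (match_material_to_textureset material_name textureset_names slot_name)

-- ===== LEMMAS AND PROOFS =====

-- find? for an exact-equality predicate is membership
theorem pv_find_self (x : String) : ∀ xs : List String, xs.find? (fun n => n == x) = if xs.contains x then some x else none := by
  intro xs
  induction xs with
  | nil => simp
  | cons n rest ih =>
      by_cases h : n = x
      · simp [h]
      · have hx : ¬ x = n := fun e => h e.symm
        simp [h, ih, hx]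

theorem pv_loopSlot_eq (t : String) : ∀ xs : List String, pvLoopSlot t xs = xs.find? (fun n => PySem.Str.lower n == t) := by
  intro xs
  induction xs with
  | nil => rfl
  | cons n rest ih =>
      by_cases h : PySem.Str.lower n == t
      · simp [pvLoopSlot, h]
      · simp [pvLoopSlot, h, ih]

theorem pv_loop5_eq (a b : String) : ∀ xs : List String,
    pvLoop5 a b xs = xs.find? (fun n => PySem.Str.lower n == a || PySem.Str.lower n == b) := by
  intro xs
  induction xs with
  | nil => rfl
  | cons n rest ih =>
      by_cases h : (PySem.Str.lower n == a || PySem.Str.lower n == b)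
      · simp only [pvLoop5, List.find?_cons, h]; simp
      · simp only [pvLoop5, List.find?_cons]; simp [h, ih]

-- one register of B's loop: "keep the first match" behaves like Option.or with find?
theorem pv_or_find_cons (p : String → Bool) (a : Option String) (n : String) (xs : List String)
    (c : Bool) (hc : c = (a.isNone && p n)) :
    (if c then some n else a).or (xs.find? p) = a.or ((n :: xs).find? p) := by
  subst hc
  cases a with
  | some v => simp
  | none => by_cases h : p n <;> simp [h]

-- B's fold computes, in each register, the first element satisfying that rank's predicate
theorem pv_fold_eq (slotOk : Bool) (sv m stripped sl ml spl : String) :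
    ∀ (xs : List String) (a1 a2 a3 a4 a5 : Option String),
    xs.foldl (pvStep slotOk sv m stripped sl ml spl) (a1, a2, a3, a4, a5) =
      (a1.or (xs.find? fun n => slotOk && (n == sv)),
       a2.or (xs.find? fun n => slotOk && (PySem.Str.lower n == sl)),
       a3.or (xs.find? fun n => n == m),
       a4.or (xs.find? fun n => (stripped != m) && (n == stripped)),
       a5.or (xs.find? fun n => (PySem.Str.lower n == ml || PySem.Str.lower n == spl))) := by
  intro xs
  induction xs with
  | nil => intro a1 a2 a3 a4 a5; simp
  | cons n rest ih =>
      intro a1 a2 a3 a4 a5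
      rw [List.foldl_cons]
      show rest.foldl _ (_, _, _, _, _) = _
      rw [ih]
      refine Prod.ext ?_ (Prod.ext ?_ (Prod.ext ?_ (Prod.ext ?_ ?_))) <;> simp only []
      · exact pv_or_find_cons _ a1 n rest _ (by cases slotOk <;> cases a1 <;> simp)
      · exact pv_or_find_cons _ a2 n rest _ (by cases slotOk <;> cases a2 <;> simp)
      · exact pv_or_find_cons _ a3 n rest _ (by cases a3 <;> simp)
      · exact pv_or_find_cons _ a4 n rest _ (by cases a4 <;> simp)
      · exact pv_or_find_cons _ a5 n rest _ (by cases a5 <;> simp)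

-- A's fallback (steps 3–5) equals the or-chain of B's last three registers
theorem pv_fallback_eq (m : String) (xs : List String)
    (stripped : String)
    (hstr : stripped = (if PySem.Str.startswith m "MI_" || PySem.Str.startswith m "mi_"
                        then PySem.Str.slice m (some 3) none else m)) :
    pvFallbackA m xs =
      (xs.find? fun n => n == m).or
        ((xs.find? fun n => (stripped != m) && (n == stripped)).or
          (xs.find? fun n => (PySem.Str.lower n == PySem.Str.lower m || PySem.Str.lower n == PySem.Str.lower stripped))) := by
  unfold pvFallbackA
  rw [← hstr, pv_find_self m xs]
  by_cases hm : m ∈ xs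
  · have hm' : xs.contains m = true := by simpa using hm
    simp [hm]
  · have hm' : xs.contains m = false := by simpa using hm
    simp only [hm', if_false, Option.none_or, Bool.false_eq_true]
    by_cases h4 : stripped = m
    · have : (fun n => (stripped != m) && (n == stripped)) = (fun _ : String => false) := by
        funext n; simp [h4]
      rw [this]
      have hnone : xs.find? (fun _ : String => false) = none := by simp [List.find?_eq_none]
      rw [hnone]
      simp [h4, pv_loop5_eq]
    · have hb : (stripped != m) = true := by simp [h4]
      have : (fun n => (stripped != m) && (n == stripped)) = (fun n : String => n == stripped) := by
        funext n; simp [hb]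
      rw [this, pv_find_self stripped xs]
      by_cases hs : stripped ∈ xs
      · have hs' : xs.contains stripped = true := by simpa using hs
        simp [hs, hb]
      · have hs' : xs.contains stripped = false := by simpa using hs
        simp [hs, hb, pv_loop5_eq]

-- ===== VERDICT (by name: the statement is the Claim_ definition above) =====
theorem match_material_to_textureset_spec : Claim_equal_match_material_to_textureset := by
  intro m xs slot _dom
  unfold Spec_match_material_to_textureset
  unfold match_material_to_textureset match_material_to_textureset_alt
  cases slot with
  | none =>
      simp only []
      rw [pv_fold_eq]
      simp only [Bool.false_and, Bool.false_eq_true]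
      rw [pv_fallback_eq m xs _ rfl]
      have hff : List.find? (fun _ : String => false) xs = none := by simp
      simp only [hff, Option.none_or]
  | some s =>
      by_cases hs : s = ""
      · subst hs
        simp only [ne_eq, not_true_eq_false, if_false, Option.getD_some, beq_self_eq_true,
          Bool.not_true]
        rw [pv_fold_eq]
        simp only [Bool.false_and, Bool.false_eq_true]
        rw [pv_fallback_eq m xs _ rfl]
        have hff : List.find? (fun _ : String => false) xs = none := by simp
        simp only [hff, Option.none_or]
      · have hsb : (s == "") = false := by simp [hs]
        simp only [ne_eq, hs, not_false_eq_true, if_true, hsb, Bool.not_false, Option.getD_some]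
        rw [pv_fold_eq]
        simp only [Bool.true_and]
        by_cases hc : s ∈ xs
        · have hc' : xs.contains s = true := by simpa using hc
          simp [hc, pv_find_self s xs]
        · have hc' : xs.contains s = false := by simpa using hc
          rw [pv_find_self s xs]
          simp only [hc', if_false, Option.none_or, Bool.false_eq_true]
          rw [pv_loopSlot_eq (PySem.Str.lower s) xs]
          cases hfind : xs.find? (fun n => PySem.Str.lower n == PySem.Str.lower s) with
          | some n => simp
          | none =>
              simp only [Option.none_or]
              rw [pv_fallback_eq m xs _ rfl]
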